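-- pv_equiv track=rewrite | github.com/YazonDA/CodeWars_task | ProblemTask/Simple_Fun_303_Prime_Product.py | prime_product
-- ===== SOURCE A (Python) =====
-- def prime_product(n):
-- 	def prime_(w):
-- 		a = list(range(w+1))
-- 		a[1] = 0
-- 		arr = []
-- 		i = 2
-- 		while i <= w:
-- 		    if a[i] != 0:
-- 		        arr.append(a[i])
-- 		        for j in range(i, w+1, i): a[j] = 0
-- 		    i += 1
-- 		return arr
--
-- 	ans = []
-- 	arr = prime_(n)
-- 	for i in arr:
-- 		suppouse = n - i
-- 		if suppouse in arr:
-- 			ans.append(suppouse * i)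
--
-- 	return max(ans) if len(ans) else 0
-- ===== SOURCE B (Python) =====
-- def prime_product(n):
--     # Sieve of Eratosthenes as a boolean table (O(1) membership), then search
--     # downward from n//2: the first prime pair (k, n-k) found has the maximal product.
--     is_p = [v >= 2 for v in range(n + 1)]
--     for i in range(2, n + 1):
--         if is_p[i]:
--             for j in range(2 * i, n + 1, i):
--                 is_p[j] = False
--     for k in range(n // 2, 1, -1):
--         if is_p[k] and is_p[n - k]:
--             return k * (n - k)
--     return 0
-- ===== Notes on version B (the rewrite author's own statement) =====
-- stated objective: faster
-- what changed: B replaces A's quadratic pairing phase (a linear 'in arr' list scan per prime, plus building a list of all products and taking max) with a boolean sieve giving O(1) primality lookups and an early-exit downward scan from n//2, whose first hit is the maximal product; A's sieve of zeroed list entries becomes a boolean table.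
import Mathlib
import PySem

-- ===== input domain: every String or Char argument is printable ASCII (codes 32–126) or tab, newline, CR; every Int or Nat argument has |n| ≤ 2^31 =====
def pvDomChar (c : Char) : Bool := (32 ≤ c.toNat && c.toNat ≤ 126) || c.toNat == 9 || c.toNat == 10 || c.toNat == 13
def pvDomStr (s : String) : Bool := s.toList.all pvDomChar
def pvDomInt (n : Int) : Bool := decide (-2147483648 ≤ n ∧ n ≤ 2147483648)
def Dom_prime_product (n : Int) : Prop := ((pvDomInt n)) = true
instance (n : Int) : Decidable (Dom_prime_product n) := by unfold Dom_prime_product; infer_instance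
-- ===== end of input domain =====

-- B replaces A's list-membership pairing scan (quadratic in the number of primes) by a
-- boolean sieve with O(1) lookups and an early-exit downward search from n//2.

-- ===== PORT A =====
-- inner 'for j in range(i, w+1, i): a[j] = 0'
def pvA_cross (wp1 i : Int) (a : List Int) : List Int :=
  (PySem.List.pyRange i wp1 i).foldl (fun a j => PySem.List.pySetD a j 0) a

-- 'while i <= w: …' ; fuel = number of remaining iterations (exact under Pre_)
def pvA_while : Nat → Int → Int → List Int → List Int → List Int × List Int
  | 0, _, _, a, arr => (a, arr)
  | fuel+1, i, w, a, arr =>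
    if i ≤ w then
      if PySem.List.pyGetD a i 0 ≠ 0 then
        pvA_while fuel (i+1) w (pvA_cross (w+1) i a) (arr ++ [PySem.List.pyGetD a i 0])
      else pvA_while fuel (i+1) w a arr
    else (a, arr)

-- def prime_(w): the sieve helper (a[1] = 0 is in range under Pre_, 1 ≤ n)
def pvA_prime (w : Int) : List Int :=
  let a := PySem.List.pySetD (PySem.List.pyRange 0 (w+1) 1) 1 0
  (pvA_while (w - 1).toNat 2 w a []).2

def prime_product (n : Int) : Int :=
  let arr := pvA_prime n
  let ans := arr.foldl (fun ans i => if arr.contains (n - i) then ans ++ [(n - i) * i] else ans) []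
  -- 'max(ans) if len(ans) else 0' ; max? is some on the nonempty branch
  if ans.length ≠ 0 then (PySem.List.max? ans (fun x => x)).getD 0 else 0

-- ===== PORT B =====
-- 'is_p = [v >= 2 for v in range(n + 1)]'
def pvB_isp0 (n : Int) : List Bool :=
  (PySem.List.pyRange 0 (n+1) 1).map (fun v => decide ((2:Int) ≤ v))

-- 'for j in range(2 * i, n + 1, i): is_p[j] = False'
def pvB_cross (n i : Int) (a : List Bool) : List Bool :=
  (PySem.List.pyRange (2*i) (n+1) i).foldl (fun a j => PySem.List.pySetD a j false) a

-- body of 'for i in range(2, n + 1): if is_p[i]: …'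
def pvB_step (n : Int) (a : List Bool) (i : Int) : List Bool :=
  if PySem.List.pyGetD a i false then pvB_cross n i a else a

def pvB_flags (n : Int) : List Bool :=
  (PySem.List.pyRange 2 (n+1) 1).foldl (pvB_step n) (pvB_isp0 n)

-- 'for k in range(n // 2, 1, -1): if is_p[k] and is_p[n - k]: return k * (n - k)' / 'return 0'
def pvB_scan (n : Int) (isp : List Bool) : List Int → Int
  | [] => 0
  | k :: ks =>
    if PySem.List.pyGetD isp k false && PySem.List.pyGetD isp (n - k) false
    then k * (n - k) else pvB_scan n isp ks

def prime_product_alt (n : Int) : Int :=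
  pvB_scan n (pvB_flags n) (PySem.List.pyRange (PySem.Int.floordiv n 2) 1 (-1))

-- ===== PRECONDITION & SPEC =====
-- Pre_ excludes n ≤ 0, where A raises IndexError (a[1] = 0 on a list of length ≤ 1).
def Pre_prime_product (n : Int) : Prop := 1 ≤ n
instance (n : Int) : Decidable (Pre_prime_product n) := by unfold Pre_prime_product; infer_instance
def pvWitness_prime_product : Int := 10


def Spec_prime_product (n : Int) (out : Int) : Prop := out = prime_product_alt n
instance (n : Int) (out : Int) : Decidable (Spec_prime_product n out) := by unfold Spec_prime_product; infer_instance

-- ===== CLAIM (what is proved, stated in full; the proofs are below) =====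
def Claim_equal_prime_product : Prop :=
  ∀ (n : Int), Dom_prime_product n → Pre_prime_product n → Spec_prime_product n (prime_product n)

-- ===== LEMMAS AND PROOFS =====

-- effect of a fold of list assignments on length and entries
lemma pv_foldlSet_length {α : Type} (l : List Int) (hl : ∀ j ∈ l, 0 ≤ j) (a : List α) (v : α) :
    (l.foldl (fun a j => PySem.List.pySetD a j v) a).length = a.length := by
  induction l generalizing a with
  | nil => rfl
  | cons j l ih =>
    simp only [List.foldl_cons]
    rw [ih (fun x hx => hl x (List.mem_cons_of_mem _ hx)),
      PySem.List.pySetD_of_nonneg _ _ (hl j List.mem_cons_self), List.length_set]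

lemma pv_foldlSet_getD {α : Type} (l : List Int) (hl : ∀ j ∈ l, 0 ≤ j) (a : List α) (v d : α)
    (m : Nat) :
    (l.foldl (fun a j => PySem.List.pySetD a j v) a).getD m d =
      if (m : Int) ∈ l ∧ m < a.length then v else a.getD m d := by
  induction l generalizing a with
  | nil => simp
  | cons j l ih =>
    have hj := hl j List.mem_cons_self
    simp only [List.foldl_cons]
    rw [ih (fun x hx => hl x (List.mem_cons_of_mem _ hx)),
      PySem.List.pySetD_of_nonneg _ _ hj, List.length_set]
    by_cases hm : (m : Int) ∈ l ∧ m < a.length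
    · simp [List.mem_cons, hm.1, hm.2]
    · by_cases he : (m : Int) = j
      · have hjm : j.toNat = m := by omega
        by_cases hlt : m < a.length
        · rw [if_neg hm, if_pos ⟨by simp [he], hlt⟩, List.getD_eq_getElem?_getD,
            List.getElem?_set, if_pos hjm, if_pos (hjm ▸ hlt)]
          rfl
        · rw [if_neg hm, if_neg (by tauto), List.getD_eq_getElem?_getD, List.getD_eq_getElem?_getD,
            List.getElem?_set, if_pos hjm, if_neg (hjm ▸ hlt),
            List.getElem?_eq_none (by omega)]
      · have hne : j.toNat ≠ m := by omega
        rw [if_neg hm, if_neg (by simp [List.mem_cons, he]; exact fun h => le_of_not_gt fun h2 => hm ⟨h, h2⟩), List.getD_eq_getElem?_getD,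
          List.getD_eq_getElem?_getD, List.getElem?_set_ne hne]

-- flags at an index below every remaining loop index are frozen
lemma pv_frozen (n : Int) (l : List Int) (isp : List Bool) (m : Nat)
    (h : ∀ x ∈ l, (m : Int) < x ∧ 0 < x) :
    (l.foldl (pvB_step n) isp).getD m false = isp.getD m false := by
  induction l generalizing isp with
  | nil => rfl
  | cons x l ih =>
    have hx := h x List.mem_cons_self
    simp only [List.foldl_cons]
    rw [ih _ (fun y hy => h y (List.mem_cons_of_mem _ hy))]
    unfold pvB_step pvB_cross
    split
    · rw [pv_foldlSet_getD _ (fun j hj => by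
        rcases (PySem.List.mem_pyRange_iff_of_pos hx.2 j).mp hj with ⟨h1, _, _⟩; omega)]
      rw [if_neg (fun hc => by
        rcases (PySem.List.mem_pyRange_iff_of_pos hx.2 _).mp hc.1 with ⟨h1, _, _⟩; omega)]
    · rfl

-- the two sieves, run in lockstep over i = 2 … w, produce A's prime list as a filter of B's flags
lemma pv_lockstep (w : Int) : ∀ (fuel : Nat) (i : Int) (a : List Int) (arr : List Int) (isp : List Bool),
    2 ≤ i → (fuel : Int) = w + 1 - i →
    a.length = isp.length → ((a.length : Int) = w + 1) →
    (∀ m : Nat, i ≤ (m : Int) → m < a.length →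
      ((a.getD m 0 ≠ 0 ↔ isp.getD m false = true) ∧ (a.getD m 0 ≠ 0 → a.getD m 0 = (m : Int)))) →
    (pvA_while fuel i w a arr).2
      = arr ++ (PySem.List.pyRange i (w+1) 1).filter
          (fun j => ((PySem.List.pyRange i (w+1) 1).foldl (pvB_step w) isp).getD j.toNat false) := by
  intro fuel
  induction fuel with
  | zero =>
    intro i a arr isp h2 hfuel hlen hlenw hC
    rw [PySem.List.pyRange_one_eq_nil (by push_cast at hfuel; omega)]
    simp [pvA_while]
  | succ fuel ih =>
    intro i a arr isp h2 hfuel hlen hlenw hC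
    have hiw : i ≤ w := by push_cast at hfuel; omega
    have hrange : PySem.List.pyRange i (w+1) 1 = i :: PySem.List.pyRange (i+1) (w+1) 1 :=
      PySem.List.pyRange_one_cons (by omega)
    have hmi : i.toNat < a.length := by omega
    have hgetA : PySem.List.pyGetD a i 0 = a.getD i.toNat 0 :=
      PySem.List.pyGetD_of_nonneg _ _ (by omega)
    have hCi := hC i.toNat (by omega) hmi
    simp only [pvA_while, if_pos hiw, hgetA, hrange, List.foldl_cons, List.filter_cons]
    have hfrozen : ∀ isp' : List Bool,
        ((PySem.List.pyRange (i+1) (w+1) 1).foldl (pvB_step w) isp').getD i.toNat false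
          = isp'.getD i.toNat false := fun isp' =>
      pv_frozen w _ _ _ (fun x hx => by
        rcases PySem.List.mem_pyRange_one.mp hx with ⟨hx1, hx2⟩; constructor <;> omega)
    by_cases hA : a.getD i.toNat 0 ≠ 0
    · have hflag : isp.getD i.toNat false = true := hCi.1.mp hA
      have hstep : pvB_step w isp i = pvB_cross w i isp := by
        unfold pvB_step
        rw [PySem.List.pyGetD_of_nonneg _ _ (by omega), hflag]
        simp
      have hcrossA : ∀ m : Nat, (pvA_cross (w+1) i a).getD m 0
          = if (m : Int) ∈ PySem.List.pyRange i (w+1) i ∧ m < a.length then 0 else a.getD m 0 := by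
        intro m
        unfold pvA_cross
        exact pv_foldlSet_getD _ (fun j hj => by
          rcases (PySem.List.mem_pyRange_iff_of_pos (by omega) j).mp hj with ⟨h1, _, _⟩; omega) _ _ _ _
      have hcrossB : ∀ m : Nat, (pvB_cross w i isp).getD m false
          = if (m : Int) ∈ PySem.List.pyRange (2*i) (w+1) i ∧ m < isp.length then false
            else isp.getD m false := by
        intro m
        unfold pvB_cross
        exact pv_foldlSet_getD _ (fun j hj => by
          rcases (PySem.List.mem_pyRange_iff_of_pos (by omega) j).mp hj with ⟨h1, _, _⟩; omega) _ _ _ _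
      have hfi : ((PySem.List.pyRange (i+1) (w+1) 1).foldl (pvB_step w) (pvB_step w isp i)).getD
          i.toNat false = true := by
        rw [hfrozen, hstep, hcrossB]
        rw [if_neg (fun hc => by
          rcases (PySem.List.mem_pyRange_iff_of_pos (by omega : (0:Int) < i) _).mp hc.1
            with ⟨h1, _, _⟩; omega)]
        exact hflag
      have hval : a.getD i.toNat 0 = i := by
        have := hCi.2 hA; omega
      have hlenA : (pvA_cross (w+1) i a).length = a.length := by
        unfold pvA_cross
        exact pv_foldlSet_length _ (fun j hj => by
          rcases (PySem.List.mem_pyRange_iff_of_pos (by omega) j).mp hj with ⟨h1, _, _⟩; omega) _ _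
      have hlenB : (pvB_cross w i isp).length = isp.length := by
        unfold pvB_cross
        exact pv_foldlSet_length _ (fun j hj => by
          rcases (PySem.List.mem_pyRange_iff_of_pos (by omega) j).mp hj with ⟨h1, _, _⟩; omega) _ _
      rw [if_pos hA, hval, hfi]
      have hihyp : ∀ m : Nat, i + 1 ≤ (m : Int) → m < (pvA_cross (w+1) i a).length →
          (((pvA_cross (w+1) i a).getD m 0 ≠ 0 ↔ (pvB_cross w i isp).getD m false = true) ∧
            ((pvA_cross (w+1) i a).getD m 0 ≠ 0 → (pvA_cross (w+1) i a).getD m 0 = (m : Int))) := by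
        intro m hm hmlen
        rw [hlenA] at hmlen
        rw [hcrossA, hcrossB]
        by_cases hdvd : i ∣ (m : Int)
        · have h2i : 2*i ≤ (m : Int) := by
            obtain ⟨q, hq⟩ := hdvd
            have hq2 : 2 ≤ q := by nlinarith
            nlinarith
          have hmem1 : ((m : Int) ∈ PySem.List.pyRange i (w+1) i) := by
            rw [PySem.List.mem_pyRange_iff_of_pos (by omega)]
            exact ⟨by omega, by omega, (dvd_sub_right hdvd).mpr dvd_rfl⟩
          have hmem2 : ((m : Int) ∈ PySem.List.pyRange (2*i) (w+1) i) := by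
            rw [PySem.List.mem_pyRange_iff_of_pos (by omega)]
            refine ⟨by omega, by omega, ?_⟩
            exact (dvd_sub_right hdvd).mpr (Dvd.intro 2 (mul_comm i 2))
          simp [hmem1, hmem2, hmlen, hlen ▸ hmlen]
        · have hmem1 : ¬ ((m : Int) ∈ PySem.List.pyRange i (w+1) i) := fun hc => by
            rcases (PySem.List.mem_pyRange_iff_of_pos (by omega) _).mp hc with ⟨_, _, hd⟩
            exact hdvd (by
              have : i ∣ ((m : Int) - i) + i := Dvd.dvd.add hd dvd_rfl
              simpa using this)
          have hmem2 : ¬ ((m : Int) ∈ PySem.List.pyRange (2*i) (w+1) i) := fun hc => by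
            rcases (PySem.List.mem_pyRange_iff_of_pos (by omega) _).mp hc with ⟨_, _, hd⟩
            exact hdvd (by
              have : i ∣ ((m : Int) - 2*i) + 2*i := Dvd.dvd.add hd (Dvd.intro 2 (mul_comm i 2))
              simpa using this)
          simp only [hmem1, hmem2, false_and, if_false]
          exact hC m (by omega) hmlen
      have := ih (i+1) (pvA_cross (w+1) i a) (arr ++ [i]) (pvB_cross w i isp)
        (by omega) (by push_cast at hfuel ⊢; omega)
        (by rw [hlenA, hlenB, hlen]) (by rw [hlenA]; exact hlenw) hihyp
      rw [hstep, this]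
      simp
    · have hflag : isp.getD i.toNat false = false := by
        rcases Bool.eq_false_or_eq_true (isp.getD i.toNat false) with h | h
        · exact absurd (hCi.1.mpr h) hA
        · exact h
      have hstep : pvB_step w isp i = isp := by
        unfold pvB_step
        rw [PySem.List.pyGetD_of_nonneg _ _ (by omega), hflag]
        simp
      have hfi : ((PySem.List.pyRange (i+1) (w+1) 1).foldl (pvB_step w) (pvB_step w isp i)).getD
          i.toNat false = false := by rw [hfrozen, hstep]; exact hflag
      rw [if_neg hA, hfi]
      have := ih (i+1) a arr isp (by omega) (by push_cast at hfuel ⊢; omega) hlen hlenw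
        (fun m hm hmlen => hC m (by omega) hmlen)
      rw [hstep, this]
      simp

lemma pv_sieve (n : Int) (hn : 1 ≤ n) :
    pvA_prime n = (PySem.List.pyRange 2 (n+1) 1).filter (fun j => (pvB_flags n).getD j.toNat false) := by
  have hlen0 : (PySem.List.pySetD (PySem.List.pyRange 0 (n+1) 1) 1 0).length = (n+1).toNat := by
    rw [PySem.List.pySetD_of_nonneg _ _ (by omega), List.length_set,
      PySem.List.length_pyRange_one]
    omega
  have hget0 : ∀ m : Nat, 2 ≤ (m : Int) → m < (n+1).toNat →
      (PySem.List.pySetD (PySem.List.pyRange 0 (n+1) 1) 1 0).getD m 0 = (m : Int) := by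
    intro m hm hmlt
    rw [PySem.List.pySetD_of_nonneg _ _ (by omega), List.getD_eq_getElem?_getD,
      List.getElem?_set_ne (by omega : (1:Int).toNat ≠ m), PySem.List.getElem?_pyRange_one,
      if_pos (by omega)]
    simp
  have hisp0 : ∀ m : Nat, m < (n+1).toNat →
      (pvB_isp0 n).getD m false = decide ((2:Int) ≤ (m : Int)) := by
    intro m hmlt
    unfold pvB_isp0
    rw [List.getD_eq_getElem?_getD, List.getElem?_map, PySem.List.getElem?_pyRange_one,
      if_pos (by omega)]
    simp
  unfold pvA_prime pvB_flags
  rw [pv_lockstep n ((n-1).toNat) 2 _ [] (pvB_isp0 n) (by omega) (by omega)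
    (by rw [hlen0]; unfold pvB_isp0; rw [List.length_map, PySem.List.length_pyRange_one]; omega)
    (by rw [hlen0]; omega)
    (fun m hm hmlen => by
      rw [hget0 m hm (by omega : m < (n+1).toNat), hisp0 m (by omega)]
      constructor
      · constructor
        · intro _; simp; omega
        · intro _; omega
      · intro _; rfl)]
  simp

lemma pv_mem_arr (n : Int) (hn : 1 ≤ n) (x : Int) :
    x ∈ pvA_prime n ↔ (2 ≤ x ∧ x ≤ n ∧ (pvB_flags n).getD x.toNat false = true) := by
  rw [pv_sieve n hn, List.mem_filter, PySem.List.mem_pyRange_one]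
  constructor
  · rintro ⟨⟨h1, h2⟩, h3⟩; exact ⟨h1, by omega, h3⟩
  · rintro ⟨h1, h2, h3⟩; exact ⟨⟨h1, by omega⟩, h3⟩

-- 'k and n-k are both ≥ 2 and flagged prime'
def pvQ (n k : Int) : Prop :=
  2 ≤ k ∧ 2 ≤ n - k ∧ (pvB_flags n).getD k.toNat false = true ∧ (pvB_flags n).getD (n-k).toNat false = true

-- A's 'ans' list in closed form
def pv_ans (n : Int) : List Int :=
  ((pvA_prime n).filter (fun i => (pvA_prime n).contains (n - i))).map (fun i => (n - i) * i)

lemma pv_prime_product_eq (n : Int) :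
    prime_product n =
      if (pv_ans n).length ≠ 0 then (PySem.List.max? (pv_ans n) (fun x => x)).getD 0 else 0 := by
  unfold prime_product pv_ans
  simp only [PySem.List.foldl_append_if, List.nil_append]

lemma pv_mem_ans (n : Int) (v : Int) :
    v ∈ pv_ans n ↔ ∃ i, i ∈ pvA_prime n ∧ (n - i) ∈ pvA_prime n ∧ v = (n - i) * i := by
  unfold pv_ans
  simp only [List.mem_map, List.mem_filter, List.contains_iff_mem]
  constructor
  · rintro ⟨i, ⟨h1, h2⟩, h3⟩; exact ⟨i, h1, h2, h3.symm⟩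
  · rintro ⟨i, h1, h2, h3⟩; exact ⟨i, ⟨h1, h2⟩, h3.symm⟩

lemma pv_pair_Q (n : Int) (hn : 1 ≤ n) (i : Int) (h1 : i ∈ pvA_prime n)
    (h2 : (n - i) ∈ pvA_prime n) : pvQ n i := by
  rw [pv_mem_arr n hn] at h1 h2
  exact ⟨h1.1, h2.1, h1.2.2, h2.2.2⟩

lemma pv_Q_symm (n : Int) (k : Int) (h : pvQ n k) : pvQ n (n - k) := by
  obtain ⟨h1, h2, h3, h4⟩ := h
  refine ⟨h2, by omega, h4, ?_⟩
  have he : n - (n - k) = k := by omega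
  rw [he]
  exact h3

lemma pv_Q_mem (n : Int) (hn : 1 ≤ n) (k : Int) (h : pvQ n k) :
    k ∈ pvA_prime n ∧ (n - k) ∈ pvA_prime n := by
  obtain ⟨h1, h2, h3, h4⟩ := h
  rw [pv_mem_arr n hn, pv_mem_arr n hn]
  exact ⟨⟨h1, by omega, h3⟩, ⟨h2, by omega, h4⟩⟩

lemma pv_A_none (n : Int) (hn : 1 ≤ n)
    (h : ∀ k, 2 ≤ k → k ≤ PySem.Int.floordiv n 2 → ¬ pvQ n k) :
    prime_product n = 0 := by
  have hfd : PySem.Int.floordiv n 2 = n / 2 := PySem.Int.floordiv_eq_ediv_of_pos (by omega)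
  rw [hfd] at h
  rw [pv_prime_product_eq]
  have hnil : pv_ans n = [] := by
    unfold pv_ans
    rw [List.map_eq_nil_iff, List.filter_eq_nil_iff]
    intro i hi hcont
    rw [List.contains_iff_mem] at hcont
    have hQ := pv_pair_Q n hn i hi hcont
    by_cases hle : i ≤ n - i
    · exact h i hQ.1 (by omega) hQ
    · exact h (n - i) hQ.2.1 (by omega) (pv_Q_symm n i hQ)
  rw [hnil]
  simp

lemma pv_A_max (n : Int) (hn : 1 ≤ n) (a : Int) (ha : a ≤ PySem.Int.floordiv n 2)
    (hQ : pvQ n a) (hmax : ∀ k, a < k → k ≤ PySem.Int.floordiv n 2 → ¬ pvQ n k) :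
    prime_product n = a * (n - a) := by
  have hfd : PySem.Int.floordiv n 2 = n / 2 := PySem.Int.floordiv_eq_ediv_of_pos (by omega)
  rw [hfd] at ha hmax
  rw [pv_prime_product_eq]
  obtain ⟨hamem, hamem'⟩ := pv_Q_mem n hn a hQ
  have hmem : (n - a) * a ∈ pv_ans n := (pv_mem_ans n _).mpr ⟨a, hamem, hamem', rfl⟩
  have hub : ∀ v ∈ pv_ans n, v ≤ (n - a) * a := by
    intro v hv
    obtain ⟨i, h1, h2, h3⟩ := (pv_mem_ans n v).mp hv
    have hQi := pv_pair_Q n hn i h1 h2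
    by_cases hle : i ≤ n - i
    · have hia : i ≤ a := by
        by_contra hia
        exact hmax i (by omega) (by omega) hQi
      have hna : a + i ≤ n := by omega
      nlinarith [mul_nonneg (by omega : (0:Int) ≤ a - i) (by omega : (0:Int) ≤ n - a - i)]
    · have hQk := pv_Q_symm n i hQi
      have hka : n - i ≤ a := by
        by_contra hka
        exact hmax (n - i) (by omega) (by omega) hQk
      have hna : a + (n - i) ≤ n := by omega
      nlinarith [mul_nonneg (by omega : (0:Int) ≤ a - (n - i))
        (by omega : (0:Int) ≤ n - a - (n - i))]
  have hne : pv_ans n ≠ [] := List.ne_nil_of_mem hmem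
  rw [if_pos (by simpa using fun hc => hne (List.eq_nil_of_length_eq_zero hc))]
  rcases hm : PySem.List.max? (pv_ans n) (fun x => x) with _ | m
  · exact absurd ((PySem.List.max?_eq_none_iff _ _).mp hm) hne
  · have h1 := PySem.List.max?_mem hm
    have h2 := PySem.List.max?_isMax hm _ hmem
    have h3 := hub m h1
    simp only [Option.getD_some]
    have : m = (n - a) * a := le_antisymm h3 h2
    rw [this]; ring

lemma pv_scan_down (n : Int) (hn : 1 ≤ n) :
    ∀ (t : Nat) (a : Int), (a - 1).toNat = t → a ≤ PySem.Int.floordiv n 2 →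
    (∀ k, a < k → k ≤ PySem.Int.floordiv n 2 → ¬ pvQ n k) →
    pvB_scan n (pvB_flags n) (PySem.List.pyRange a 1 (-1)) = prime_product n := by
  intro t
  induction t with
  | zero =>
    intro a hat hfd hmax
    rw [PySem.List.pyRange_neg_one_eq_nil (by omega), pv_A_none n hn
      (fun k hk2 hkfd => hmax k (by omega) hkfd)]
    rfl
  | succ t ih =>
    intro a hat hfd hmax
    have hfd' : PySem.Int.floordiv n 2 = n / 2 := PySem.Int.floordiv_eq_ediv_of_pos (by omega)
    have ha2 : 2 ≤ a := by omega
    have hna : 2 ≤ n - a := by rw [hfd'] at hfd; omega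
    rw [PySem.List.pyRange_neg_one_cons (by omega : (1:Int) < a)]
    simp only [pvB_scan]
    rw [PySem.List.pyGetD_of_nonneg _ _ (by omega : (0:Int) ≤ a),
      PySem.List.pyGetD_of_nonneg _ _ (by omega : (0:Int) ≤ n - a)]
    by_cases hc : (pvB_flags n).getD a.toNat false = true ∧ (pvB_flags n).getD (n-a).toNat false = true
    · rw [if_pos (by rw [hc.1, hc.2]; rfl)]
      exact (pv_A_max n hn a hfd ⟨ha2, hna, hc.1, hc.2⟩ hmax).symm
    · rw [if_neg (by
        intro hand
        rw [Bool.and_eq_true] at hand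
        exact hc ⟨hand.1, hand.2⟩)]
      exact ih (a - 1) (by omega) (by omega) (fun k hk1 hk2 => by
        by_cases hk : k = a
        · subst hk
          exact fun hQ => hc ⟨hQ.2.2.1, hQ.2.2.2⟩
        · exact hmax k (by omega) hk2)

-- ===== VERDICT (by name: the statement is the Claim_ definition above) =====
theorem prime_product_spec : Claim_equal_prime_product := by
  intro n _ hn
  unfold Spec_prime_product prime_product_alt
  exact (pv_scan_down n hn _ (PySem.Int.floordiv n 2) rfl le_rfl
    (fun k hk hk' => absurd hk' (not_le.mpr hk))).symm
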